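-- pv_equiv track=rewrite | github.com/E-qin/GEAR | preprocess/data_prepare.py | _truncate_cp
-- ===== SOURCE A (Python) =====
-- def _truncate_cp(list_dict, force_list_size):
--     # for a dict of list, truncate each list if ...
--     # for k in list_dict:
--     #     list_dict[k] = list_dict[k][:force_list_size]
--     for key in list_dict:
--         length = len(list_dict[key])
--         if length > force_list_size:
--             list_dict[key] = list_dict[key][:force_list_size]
--         elif length < force_list_size:
--             times = force_list_size // length
--             remainder = force_list_size % length
--             list_dict[key] = list_dict[key] * times + list_dict[key][:remainder]
--     return list_dict
-- ===== SOURCE B (Python) =====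
-- def _truncate_cp(list_dict, force_list_size):
--     # rebuild each list by modular indexing over the output positions:
--     # truncation, identity and cyclic padding are all one comprehension
--     for key in list_dict:
--         lst = list_dict[key]
--         n = len(lst)
--         list_dict[key] = [lst[i % n] for i in range(force_list_size)]
--     return list_dict
-- ===== Notes on version B (the rewrite author's own statement) =====
-- stated objective: idiomatic
-- what changed: The per-key truncate/identity/tile branching (slice, // and % block tiling, remainder slice) is replaced by a single modular-index comprehension [lst[i % n] for i in range(force_list_size)] over the output positions.
-- intended difference: On inputs with force_list_size < 0 where some value list is longer than -force_list_size, A returns that list with its last -force_list_size elements cut off (an artefact of Python's negative-slice semantics), while B returns the empty list, which is the intended result for a nonpositive target size. — e.g. on _truncate_cp([("a", [1, 2])], -1): A returns [("a", [1])], B returns [("a", [])]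
import Mathlib
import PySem

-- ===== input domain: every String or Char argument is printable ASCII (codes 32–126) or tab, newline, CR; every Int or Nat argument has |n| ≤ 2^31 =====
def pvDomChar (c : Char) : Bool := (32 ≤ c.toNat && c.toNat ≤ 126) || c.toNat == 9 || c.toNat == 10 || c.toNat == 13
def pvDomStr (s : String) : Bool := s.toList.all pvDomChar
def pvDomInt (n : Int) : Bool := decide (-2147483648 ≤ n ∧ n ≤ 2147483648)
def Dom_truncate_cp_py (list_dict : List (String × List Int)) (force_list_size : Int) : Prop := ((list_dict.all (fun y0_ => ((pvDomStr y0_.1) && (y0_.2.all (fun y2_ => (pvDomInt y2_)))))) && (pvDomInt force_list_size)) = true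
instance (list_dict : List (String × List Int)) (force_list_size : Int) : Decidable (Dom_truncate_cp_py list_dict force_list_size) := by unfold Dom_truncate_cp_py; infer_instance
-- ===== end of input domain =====

-- B replaces A's truncate/identity/tile branching by one modular-index comprehension per key
-- (idiomatic, not faster); both Pythons mutate the dict in place — the dict's final contents
-- (= the return value proved about here) are the same.

-- ===== PORT A =====
-- the loop body of A for one key: truncate, cyclically tile, or keep
def truncA (force_list_size : Int) (kv : String × List Int) : String × List Int :=
  let l := kv.2
  let length : Int := (l.length : Int)
  if length > force_list_size then
    (kv.1, PySem.List.slice l none (some force_list_size))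
  else if length < force_list_size then
    -- Python raises ZeroDivisionError when l = [] here; those inputs are outside Pre_
    let times := PySem.Int.floordiv force_list_size length
    let remainder := PySem.Int.mod force_list_size length
    -- 'l * times' : in this branch times ≥ 1, so flatten ∘ replicate is exact
    (kv.1, (List.replicate times.toNat l).flatten ++ PySem.List.slice l none (some remainder))
  else kv

def truncate_cp_py (list_dict : List (String × List Int)) (force_list_size : Int) : List (String × List Int) :=
  list_dict.map (truncA force_list_size)

-- ===== PORT B =====
-- B's comprehension for one key: [lst[i % n] for i in range(force_list_size)]
def truncB (force_list_size : Int) (kv : String × List Int) : String × List Int :=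
  let n : Int := (kv.2.length : Int)
  -- pyGetD is exact here: inside Pre_ every index i % n is in range (Python raises only on n = 0, outside Pre_)
  (kv.1, (PySem.List.pyRange 0 force_list_size 1).map
    (fun i => PySem.List.pyGetD kv.2 (PySem.Int.mod i n) 0))

def truncate_cp_py_alt (list_dict : List (String × List Int)) (force_list_size : Int) : List (String × List Int) :=
  list_dict.map (truncB force_list_size)

-- ===== PRECONDITION & SPEC =====
-- Pre_ excludes exactly the inputs where A raises ZeroDivisionError: a positive target size
-- together with some empty value list (B raises there too).
def Pre_truncate_cp_py (list_dict : List (String × List Int)) (force_list_size : Int) : Prop :=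
  0 < force_list_size → ∀ p ∈ list_dict, p.2 ≠ []
instance (list_dict : List (String × List Int)) (force_list_size : Int) : Decidable (Pre_truncate_cp_py list_dict force_list_size) := by unfold Pre_truncate_cp_py; infer_instance

def pvWitness_truncate_cp_py : (List (String × List Int)) × Int := ([("a", [1, 2])], 5)

-- On inputs with force_list_size < 0 where some value list is longer than -force_list_size, A returns
-- that list with its last -force_list_size elements cut off (an artefact of Python's negative-slice
-- semantics), while B returns the empty list, which is the intended result for a nonpositive target size.
def D_truncate_cp_py (list_dict : List (String × List Int)) (force_list_size : Int) : Prop :=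
  force_list_size < 0 ∧ ∃ p ∈ list_dict, 0 < force_list_size + (p.2.length : Int)
instance (list_dict : List (String × List Int)) (force_list_size : Int) : Decidable (D_truncate_cp_py list_dict force_list_size) := by unfold D_truncate_cp_py; infer_instance

def Spec_truncate_cp_py (list_dict : List (String × List Int)) (force_list_size : Int) (out : List (String × List Int)) : Prop := ¬ D_truncate_cp_py list_dict force_list_size → out = truncate_cp_py_alt list_dict force_list_size
instance (list_dict : List (String × List Int)) (force_list_size : Int) (out : List (String × List Int)) : Decidable (Spec_truncate_cp_py list_dict force_list_size out) := by unfold Spec_truncate_cp_py; infer_instance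

def pvDiffWitness_truncate_cp_py : (List (String × List Int)) × Int := ([("a", [1, 2])], -1)
def pvDiffWitnessOut_truncate_cp_py : (List (String × List Int)) × (List (String × List Int)) :=
  ([("a", [1])], [("a", [])])

-- ===== CLAIM (what is proved, stated in full; the proofs are below) =====
def Claim_unchanged_truncate_cp_py : Prop := ∀ (list_dict : List (String × List Int)) (force_list_size : Int), Dom_truncate_cp_py list_dict force_list_size → Pre_truncate_cp_py list_dict force_list_size → Spec_truncate_cp_py list_dict force_list_size (truncate_cp_py list_dict force_list_size)
def Claim_changed_truncate_cp_py : Prop := Dom_truncate_cp_py (pvDiffWitness_truncate_cp_py.1) (pvDiffWitness_truncate_cp_py.2) ∧ Pre_truncate_cp_py (pvDiffWitness_truncate_cp_py.1) (pvDiffWitness_truncate_cp_py.2) ∧ D_truncate_cp_py (pvDiffWitness_truncate_cp_py.1) (pvDiffWitness_truncate_cp_py.2) ∧ truncate_cp_py (pvDiffWitness_truncate_cp_py.1) (pvDiffWitness_truncate_cp_py.2) = pvDiffWitnessOut_truncate_cp_py.1 ∧ truncate_cp_py_alt (pvDiffWitness_truncate_cp_py.1) (pvDiffWitness_truncate_cp_py.2)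 = pvDiffWitnessOut_truncate_cp_py.2 ∧ pvDiffWitnessOut_truncate_cp_py.1 ≠ pvDiffWitnessOut_truncate_cp_py.2
def Claim_exact_truncate_cp_py : Prop := ∀ (list_dict : List (String × List Int)) (force_list_size : Int), Dom_truncate_cp_py list_dict force_list_size → Pre_truncate_cp_py list_dict force_list_size → D_truncate_cp_py list_dict force_list_size → truncate_cp_py list_dict force_list_size ≠ truncate_cp_py_alt list_dict force_list_size

-- ===== LEMMAS AND PROOFS =====

-- [l[k % n] for k in range F] for a nonempty list of length n is: l tiled F / n times, then l's first F % n elements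
lemma map_range_mod_getD {α : Type} (l : List α) (d : α) (F : Nat) (hN : 0 < l.length) :
    (List.range F).map (fun k => l.getD (k % l.length) d) =
      (List.replicate (F / l.length) l).flatten ++ l.take (F % l.length) := by
  induction F using Nat.strong_induction_on with
  | _ F ih =>
    by_cases hFN : F < l.length
    · rw [Nat.div_eq_of_lt hFN, Nat.mod_eq_of_lt hFN]
      simp only [List.replicate_zero, List.flatten_nil, List.nil_append]
      apply List.ext_getElem
      · simp [Nat.le_of_lt hFN]
      · intro i h1 h2
        simp only [List.getElem_map, List.getElem_range, List.getElem_take]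
        have hi : i < F := by simpa using h1
        rw [Nat.mod_eq_of_lt (lt_trans hi hFN), List.getD_eq_getElem l d (lt_trans hi hFN)]
    · rw [Nat.not_lt] at hFN
      obtain ⟨G, rfl⟩ : ∃ G, F = l.length + G := ⟨F - l.length, by omega⟩
      rw [List.range_add, List.map_append, List.map_map]
      have h1 : (List.range l.length).map (fun k => l.getD (k % l.length) d) = l := by
        apply List.ext_getElem
        · simp
        · intro i h1 h2
          simp only [List.getElem_map, List.getElem_range]
          rw [Nat.mod_eq_of_lt h2, List.getD_eq_getElem l d h2]
      have h2 : ((fun k => l.getD (k % l.length) d) ∘ (l.length + ·)) =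
          fun k => l.getD (k % l.length) d := by
        funext k; simp [Nat.add_mod_left]
      rw [h1, h2, ih G (by omega) ]
      have e1 : (l.length + G) / l.length = G / l.length + 1 := by
        rw [Nat.add_comm, Nat.add_div_right _ hN]
      have e2 : (l.length + G) % l.length = G % l.length := Nat.add_mod_left _ _
      rw [e1, e2, List.replicate_succ, List.flatten_cons, List.append_assoc]

lemma entry_eq (f : Int) (kv : String × List Int)
    (h1 : 0 < f → kv.2 ≠ []) (h2 : 0 ≤ f ∨ f + (kv.2.length : Int) ≤ 0) :
    truncA f kv = truncB f kv := by
  obtain ⟨key, l⟩ := kv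
  simp only at h1 h2
  by_cases hf : f < 0
  · -- negative target: both sides are (key, [])
    have h2' : f + (l.length : Int) ≤ 0 := by rcases h2 with h | h <;> omega
    have hk : 0 < (-f).toNat := by omega
    have hfe : f = -(((-f).toNat : Nat) : Int) := by omega
    have hgt : (l.length : Int) > f := by omega
    simp only [truncA, truncB, if_pos hgt]
    rw [hfe, PySem.List.slice_to_neg_natCast _ _ hk, PySem.List.pyRange_one_eq_nil (by omega)]
    simp only [List.map_nil]
    have : l.length - (-f).toNat = 0 := by omega
    rw [this, List.take_zero]
  · rcases eq_or_ne l [] with hnil | hnil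
    · -- empty list: Pre_ forces f = 0; both sides are (key, [])
      subst hnil
      have hf0 : f = 0 := by
        by_contra h
        have : 0 < f := by omega
        exact h1 this rfl
      subst hf0
      simp [truncA, truncB, PySem.List.pyRange_one_eq_nil]
    · -- nonempty list, f ≥ 0
      have hN : 0 < l.length := List.length_pos_iff.mpr hnil
      have hF : f = ((f.toNat : Nat) : Int) := by omega
      set F := f.toNat with hFdef
      -- B's comprehension in Nat form
      have hB : (PySem.List.pyRange 0 f 1).map
          (fun i => PySem.List.pyGetD l (PySem.Int.mod i (l.length : Int)) 0) =
          (List.replicate (F / l.length) l).flatten ++ l.take (F % l.length) := by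
        rw [← map_range_mod_getD l 0 F hN]
        rw [PySem.List.pyRange_one, List.map_map]
        simp only [zero_add, Int.sub_zero]
        have : (f.toNat : Int) = f := by omega
        rw [show (f.toNat) = F from rfl]
        apply List.map_congr_left
        intro k hk
        simp only [Function.comp]
        rw [PySem.Int.mod_natCast, PySem.List.pyGetD_natCast]
      rcases lt_trichotomy (l.length : Int) f with hlt | heq | hgt
      · -- cyclic padding branch
        have hbr1 : ¬ ((l.length : Int) > f) := by omega
        have e1 : PySem.Int.floordiv f (l.length : Int) = ((F / l.length : Nat) : Int) := by
          rw [hF]; exact PySem.Int.floordiv_natCast F l.length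
        have e2 : PySem.Int.mod f (l.length : Int) = ((F % l.length : Nat) : Int) := by
          rw [hF]; exact PySem.Int.mod_natCast F l.length
        simp only [truncA, truncB, if_neg hbr1, if_pos hlt]
        rw [hB, e1, e2, PySem.List.slice_to_natCast, Int.toNat_natCast]
      · -- equal length: A keeps the entry
        simp only [truncA, truncB]
        rw [if_neg (by omega), if_neg (by omega), hB]
        have hFN : F = l.length := by omega
        rw [hFN, Nat.div_self hN, Nat.mod_self]
        simp
      · -- truncation branch
        simp only [truncA, truncB, if_pos hgt]
        rw [hB, PySem.List.slice_to l (by omega), show f.toNat = F from rfl]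
        have hFltN : F < l.length := by omega
        rw [Nat.div_eq_of_lt hFltN, Nat.mod_eq_of_lt hFltN]
        simp

lemma entry_ne (f : Int) (kv : String × List Int)
    (hf : f < 0) (hlen : 0 < f + (kv.2.length : Int)) :
    (truncA f kv).2 ≠ (truncB f kv).2 := by
  obtain ⟨key, l⟩ := kv
  simp only at hlen
  have hk : 0 < (-f).toNat := by omega
  have hfe : f = -(((-f).toNat : Nat) : Int) := by omega
  have hgt : (l.length : Int) > f := by omega
  simp only [truncA, truncB, if_pos hgt]
  rw [hfe, PySem.List.slice_to_neg_natCast _ _ hk, PySem.List.pyRange_one_eq_nil (by omega)]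
  simp only [List.map_nil]
  intro h
  have := congrArg List.length h
  simp at this
  omega

-- ===== VERDICT (by name: the statement is the Claim_ definition above) =====
theorem truncate_cp_py_spec : Claim_unchanged_truncate_cp_py := by
  intro d f _ hpre hnD
  show truncate_cp_py d f = truncate_cp_py_alt d f
  unfold truncate_cp_py truncate_cp_py_alt
  refine List.map_eq_map_iff.mpr ?_
  intro kv hkv
  apply entry_eq
  · intro hf; exact hpre hf kv hkv
  · by_cases hf : 0 ≤ f
    · exact Or.inl hf
    · refine Or.inr ?_
      unfold D_truncate_cp_py at hnD
      rcases not_and_or.mp hnD with h | h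
      · omega
      · have h2 := not_and.mp (not_exists.mp h kv) hkv
        omega

theorem truncate_cp_py_changed : Claim_changed_truncate_cp_py := by
  unfold Claim_changed_truncate_cp_py; decide

theorem truncate_cp_py_tight : Claim_exact_truncate_cp_py := by
  intro d f _ _ hD heq
  obtain ⟨hf, p, hp, hlen⟩ := hD
  have := List.map_eq_map_iff.mp heq p hp
  exact entry_ne f p hf hlen (congrArg Prod.snd this)
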